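-- pv_equiv track=rewrite | github.com/ye-kyaw-thu/wfst_nlp_tutorials | visualization/tiny_ws/script/evaluate_segmentation.py | extract_token_level_errors_by_spans
-- ===== SOURCE A (Python) =====
-- def extract_token_level_errors_by_spans(ref_tokens, hyp_tokens):
--     errors = []
--
--     # Reconstruct original sentence
--     ref_text = "".join(ref_tokens)
--     hyp_text = "".join(hyp_tokens)
--
--     if ref_text != hyp_text:
--         # Can't compare if character sequences mismatch (e.g., decoding issues)
--         return errors
--
--     def get_spans(tokens):
--         spans = []
--         offset = 0
--         for token in tokens:
--             start = offset
--             end = offset + len(token)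
--             spans.append((start, end, token))
--             offset = end
--         return spans
--
--     ref_spans = get_spans(ref_tokens)
--     hyp_spans = get_spans(hyp_tokens)
--
--     hyp_span_set = {(start, end) for (start, end, _) in hyp_spans}
--     hyp_span_map = {(start, end): token for (start, end, token) in hyp_spans}
--
--     for (start, end, gold_token) in ref_spans:
--         if (start, end) not in hyp_span_set:
--             # Find predicted tokens that overlap this gold span
--             merged_pred = ""
--             for (h_start, h_end, h_token) in hyp_spans:
--                 if h_start >= end:
--                     break
--                 if h_end <= start:
--                     continue
--                 merged_pred += h_token
--             errors.append((gold_token, merged_pred))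
--
--     return errors
-- ===== SOURCE B (Python) =====
-- def extract_token_level_errors_by_spans(ref_tokens, hyp_tokens):
--     # Two-pointer sweep over the aligned character offsets: O(R + H) instead of
--     # A's per-error scan of every hypothesis span.
--     if "".join(ref_tokens) != "".join(hyp_tokens):
--         return []
--     # offsets at which an empty hypothesis token sits (they never enter a window)
--     empty_offs = set()
--     off = 0
--     for t in hyp_tokens:
--         if not t:
--             empty_offs.add(off)
--         off += len(t)
--     errors = []
--     H = len(hyp_tokens)
--     j = 0       # first hypothesis token whose span may still overlap the current ref span
--     joff = 0    # start offset of hyp_tokens[j]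
--     s = 0       # start offset of the current reference token
--     for g in ref_tokens:
--         e = s + len(g)
--         while j < H and joff + len(hyp_tokens[j]) <= s:
--             joff += len(hyp_tokens[j])
--             j += 1
--         k, koff = j, joff
--         hit = False
--         pred = ""
--         while k < H and koff < e:
--             t = hyp_tokens[k]
--             if koff == s and koff + len(t) == e:
--                 hit = True
--             pred += t
--             koff += len(t)
--             k += 1
--         if not ((not g and s in empty_offs) or hit):
--             errors.append((g, pred))
--         s = e
--     return errors
-- ===== Notes on version B (the rewrite author's own statement) =====
-- stated objective: faster
-- what changed: B replaces A's span-set/dict construction and per-error rescan of the whole hypothesis span list by a single two-pointer sweep over the aligned character offsets (plus one pass collecting offsets of empty hypothesis tokens), so each hypothesis token is visited O(1) amortized times.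
import Mathlib
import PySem

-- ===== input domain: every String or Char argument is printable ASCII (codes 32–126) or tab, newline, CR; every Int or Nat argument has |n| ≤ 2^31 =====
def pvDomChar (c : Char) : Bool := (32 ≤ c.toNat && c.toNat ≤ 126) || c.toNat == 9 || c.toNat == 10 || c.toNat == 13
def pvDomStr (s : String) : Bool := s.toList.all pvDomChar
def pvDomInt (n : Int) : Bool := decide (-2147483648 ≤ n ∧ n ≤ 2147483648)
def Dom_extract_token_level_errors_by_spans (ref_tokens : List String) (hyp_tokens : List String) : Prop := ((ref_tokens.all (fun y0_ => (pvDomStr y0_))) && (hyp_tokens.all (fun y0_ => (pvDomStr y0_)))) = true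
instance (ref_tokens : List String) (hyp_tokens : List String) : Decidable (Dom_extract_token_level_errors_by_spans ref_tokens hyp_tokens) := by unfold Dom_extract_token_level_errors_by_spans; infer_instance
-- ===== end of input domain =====

-- B replaces A's per-error scan of all hypothesis spans by a single two-pointer sweep over
-- the aligned character offsets (objective: faster).

-- ===== PORT A =====
-- get_spans: spans.append((start, end, token)); offset = end
def pvA_getSpans (tokens : List String) : List (Int × Int × String) :=
  (tokens.foldl
    (fun (acc : List (Int × Int × String) × Int) token =>
      (acc.1 ++ [(acc.2, acc.2 + PySem.Str.len token, token)], acc.2 + PySem.Str.len token))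
    ([], 0)).1

-- the inner 'for (h_start, h_end, h_token) in hyp_spans' with break/continue/merged_pred +=
def pvA_merged (s e : Int) : List (Int × Int × String) → String
  | [] => ""
  | (hs, he, t) :: rest =>
    if e ≤ hs then ""                          -- if h_start >= end: break
    else if he ≤ s then pvA_merged s e rest    -- if h_end <= start: continue
    else t ++ pvA_merged s e rest              -- merged_pred += h_token

-- body of 'for (start, end, gold_token) in ref_spans'
def pvA_step (hyp_spans : List (Int × Int × String)) (hyp_span_set : PySem.Set (Int × Int))
    (errors : List (String × String)) (sp : Int × Int × String) : List (String × String) :=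
  if !(PySem.Set.contains hyp_span_set (sp.1, sp.2.1)) then
    errors ++ [(sp.2.2, pvA_merged sp.1 sp.2.1 hyp_spans)]
  else errors

def extract_token_level_errors_by_spans (ref_tokens : List String) (hyp_tokens : List String) : List (String × String) :=
  let ref_text := PySem.Str.join "" ref_tokens
  let hyp_text := PySem.Str.join "" hyp_tokens
  if ref_text ≠ hyp_text then []
  else
    let ref_spans := pvA_getSpans ref_tokens
    let hyp_spans := pvA_getSpans hyp_tokens
    let hyp_span_set : PySem.Set (Int × Int) :=
      PySem.Set.ofList (hyp_spans.map (fun x => (x.1, x.2.1)))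
    let _hyp_span_map : PySem.Dict (Int × Int) String :=   -- built by A, never used
      hyp_spans.foldl (fun d x => PySem.Dict.insert d (x.1, x.2.1) x.2.2) (PySem.Dict.mk [])
    ref_spans.foldl (pvA_step hyp_spans hyp_span_set) []

-- ===== PORT B =====
-- offsets at which an empty hypothesis token sits
def pvB_emptyOffs (hyp_tokens : List String) : PySem.Set Int :=
  (hyp_tokens.foldl
    (fun (acc : PySem.Set Int × Int) t =>
      ((if PySem.Str.len t == 0 then PySem.Set.add acc.1 acc.2 else acc.1), acc.2 + PySem.Str.len t))
    (PySem.Set.empty, 0)).1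

-- 'while j < H and joff + len(hyp_tokens[j]) <= s'
def pvB_skip (s joff : Int) : List String → Int × List String
  | [] => (joff, [])
  | t :: rest =>
    if joff + PySem.Str.len t ≤ s then pvB_skip s (joff + PySem.Str.len t) rest
    else (joff, t :: rest)

-- 'while k < H and koff < e' collecting (hit, pred)
def pvB_window (s e koff : Int) : List String → Bool × String
  | [] => (false, "")
  | t :: rest =>
    if koff < e then
      let r := pvB_window s e (koff + PySem.Str.len t) rest
      (((koff == s) && (koff + PySem.Str.len t == e)) || r.1, t ++ r.2)
    else (false, "")

-- 'for g in ref_tokens' with state (errors, joff, remaining hyp suffix, s)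
def pvB_loop (hyp_empty : PySem.Set Int) (errors : List (String × String))
    (joff : Int) (hyp : List String) (s : Int) : List String → List (String × String)
  | [] => errors
  | g :: gs =>
    let e := s + PySem.Str.len g
    let sk := pvB_skip s joff hyp
    let w := pvB_window s e sk.1 sk.2
    let matched := ((PySem.Str.len g == 0) && PySem.Set.contains hyp_empty s) || w.1
    pvB_loop hyp_empty (if matched then errors else errors ++ [(g, w.2)]) sk.1 sk.2 e gs

def extract_token_level_errors_by_spans_alt (ref_tokens : List String) (hyp_tokens : List String) : List (String × String) :=
  if PySem.Str.join "" ref_tokens ≠ PySem.Str.join "" hyp_tokens then []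
  else pvB_loop (pvB_emptyOffs hyp_tokens) [] 0 hyp_tokens 0 ref_tokens

-- ===== PRECONDITION & SPEC =====
def Spec_extract_token_level_errors_by_spans (ref_tokens : List String) (hyp_tokens : List String) (out : List (String × String)) : Prop := out = extract_token_level_errors_by_spans_alt ref_tokens hyp_tokens
instance (ref_tokens : List String) (hyp_tokens : List String) (out : List (String × String)) : Decidable (Spec_extract_token_level_errors_by_spans ref_tokens hyp_tokens out) := by unfold Spec_extract_token_level_errors_by_spans; infer_instance

-- ===== CLAIM (what is proved, stated in full; the proofs are below) =====
def Claim_equal_extract_token_level_errors_by_spans : Prop := ∀ (ref_tokens : List String) (hyp_tokens : List String), Dom_extract_token_level_errors_by_spans ref_tokens hyp_tokens → Spec_extract_token_level_errors_by_spans ref_tokens hyp_tokens (extract_token_level_errors_by_spans ref_tokens hyp_tokens)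

-- ===== LEMMAS AND PROOFS =====

-- the span list in direct recursive form
def pvSpansOf (off : Int) : List String → List (Int × Int × String)
  | [] => []
  | t :: ts => (off, off + PySem.Str.len t, t) :: pvSpansOf (off + PySem.Str.len t) ts

-- concatenation of the tokens of a span list
def pvCat : List (Int × Int × String) → String
  | [] => ""
  | x :: rest => x.2.2 ++ pvCat rest

-- the overlap predicate of A's inner loop
def pvOv (s e : Int) (x : Int × Int × String) : Bool := decide (x.1 < e) && decide (s < x.2.1)

lemma pvA_getSpans_aux (ts : List String) : ∀ (acc : List (Int × Int × String)) (off : Int),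
    ts.foldl (fun (acc : List (Int × Int × String) × Int) token =>
        (acc.1 ++ [(acc.2, acc.2 + PySem.Str.len token, token)], acc.2 + PySem.Str.len token))
      (acc, off)
    = (acc ++ pvSpansOf off ts, off + ((ts.map PySem.Str.len).sum)) := by
  induction ts with
  | nil => simp [pvSpansOf]
  | cons t ts ih =>
    intro acc off
    rw [List.foldl_cons, ih]
    simp only [pvSpansOf, List.map_cons, List.sum_cons, List.append_assoc, List.singleton_append,
      Prod.mk.injEq, true_and]
    ring

lemma pvA_getSpans_eq (ts : List String) : pvA_getSpans ts = pvSpansOf 0 ts := by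
  unfold pvA_getSpans
  rw [pvA_getSpans_aux]
  simp

lemma pvLen_nonneg (t : String) : 0 ≤ PySem.Str.len t := by
  simp [PySem.Str.len_eq]

-- lower bound / shape of spans
lemma pvSpansOf_bounds (ts : List String) : ∀ (off : Int) (x : Int × Int × String),
    x ∈ pvSpansOf off ts → off ≤ x.1 ∧ x.1 ≤ x.2.1 := by
  induction ts with
  | nil => intro off x h; simp only [pvSpansOf] at h; cases h
  | cons t ts ih =>
    intro off x h
    simp only [pvSpansOf] at h
    rcases List.mem_cons.mp h with h | h
    · subst h
      refine ⟨le_refl _, ?_⟩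
      have := pvLen_nonneg t
      show off ≤ off + PySem.Str.len t
      omega
    · have := ih (off + PySem.Str.len t) x h
      have := pvLen_nonneg t
      omega

-- A's merged equals the filtered concatenation, on a start-sorted span list
lemma pvA_merged_eq_filter (s e : Int) (L : List (Int × Int × String))
    (hs : L.Pairwise (fun a b => a.1 ≤ b.1)) :
    pvA_merged s e L = pvCat (L.filter (pvOv s e)) := by
  induction L with
  | nil => simp [pvA_merged, pvCat]
  | cons x rest ih =>
    obtain ⟨hx, hrest⟩ := List.pairwise_cons.mp hs
    obtain ⟨hs1, he1, t1⟩ := x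
    by_cases h1 : e ≤ hs1
    · have hfilter : (((hs1, he1, t1) :: rest).filter (pvOv s e)) = [] := by
        apply List.filter_eq_nil_iff.mpr
        intro b hb
        simp at hb
        rcases hb with hb | hb
        · subst hb; simp [pvOv]; intro h; omega
        · have := hx b hb; simp [pvOv]; intro h; exfalso; simp at this; omega
      rw [hfilter]
      simp [pvA_merged, h1, pvCat]
    · by_cases h2 : he1 ≤ s
      · have : pvOv s e (hs1, he1, t1) = false := by simp [pvOv]; intro h; omega
        simp [pvA_merged, h1, h2, this, ih hrest]
      · have : pvOv s e (hs1, he1, t1) = true := by simp [pvOv]; omega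
        simp [pvA_merged, h1, h2, this, pvCat, ih hrest]

-- spansOf is start-sorted
lemma pvSpansOf_pairwise (ts : List String) : ∀ off : Int,
    (pvSpansOf off ts).Pairwise (fun a b => a.1 ≤ b.1) := by
  induction ts with
  | nil => intro off; simp [pvSpansOf]
  | cons t ts ih =>
    intro off
    simp only [pvSpansOf]
    refine List.Pairwise.cons ?_ (ih _)
    intro x hx
    have hb := (pvSpansOf_bounds ts (off + PySem.Str.len t) x hx).1
    have hl := pvLen_nonneg t
    show (off, off + PySem.Str.len t, t).1 ≤ x.1
    omega

-- skip decomposition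
lemma pvB_skip_split (ts : List String) : ∀ (joff s : Int),
    ∃ P, pvSpansOf joff ts = P ++ pvSpansOf (pvB_skip s joff ts).1 (pvB_skip s joff ts).2
      ∧ (∀ x ∈ P, x.2.1 ≤ s)
      ∧ (∀ x ∈ pvSpansOf (pvB_skip s joff ts).1 (pvB_skip s joff ts).2, s < x.2.1) := by
  induction ts with
  | nil => intro joff s; exact ⟨[], by simp [pvB_skip, pvSpansOf]⟩
  | cons t ts ih =>
    intro joff s
    by_cases h : joff + PySem.Str.len t ≤ s
    · obtain ⟨P, hP1, hP2, hP3⟩ := ih (joff + PySem.Str.len t) s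
      have hsk : pvB_skip s joff (t :: ts) = pvB_skip s (joff + PySem.Str.len t) ts := by
        simp only [pvB_skip, if_pos h]
      rw [hsk]
      refine ⟨(joff, joff + PySem.Str.len t, t) :: P, ?_, ?_, ?_⟩
      · simp only [pvSpansOf, List.cons_append]; rw [hP1]
      · intro x hx
        rcases List.mem_cons.mp hx with hx | hx
        · subst hx; exact h
        · exact hP2 x hx
      · exact hP3
    · have hsk : pvB_skip s joff (t :: ts) = (joff, t :: ts) := by
        simp only [pvB_skip, if_neg h]
      rw [hsk]
      refine ⟨[], by simp, by simp, ?_⟩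
      intro x hx
      simp only [pvSpansOf] at hx
      rcases List.mem_cons.mp hx with hx | hx
      · subst hx
        show s < joff + PySem.Str.len t
        omega
      · have := (pvSpansOf_bounds ts (joff + PySem.Str.len t) x hx).1
        have := (pvSpansOf_bounds ts (joff + PySem.Str.len t) x hx).2
        omega

-- window: merged string and hit flag, given that every remaining span ends after s
lemma pvB_window_snd (s e : Int) (ts : List String) : ∀ koff : Int,
    (∀ x ∈ pvSpansOf koff ts, s < x.2.1) →
    (pvB_window s e koff ts).2 = pvCat ((pvSpansOf koff ts).filter (pvOv s e)) := by
  induction ts with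
  | nil => intro koff _; simp [pvB_window, pvSpansOf, pvCat]
  | cons t ts ih =>
    intro koff h
    by_cases hk : koff < e
    · have hrest : ∀ x ∈ pvSpansOf (koff + PySem.Str.len t) ts, s < x.2.1 :=
        fun x hx => h x (List.mem_cons_of_mem _ hx)
      have hhe : s < koff + PySem.Str.len t :=
        h (koff, koff + PySem.Str.len t, t) (List.mem_cons_self ..)
      have hh : pvOv s e (koff, koff + PySem.Str.len t, t) = true := by
        simp only [pvOv, Bool.and_eq_true, decide_eq_true_eq]
        exact ⟨hk, hhe⟩
      have heq : (pvB_window s e koff (t :: ts)).2 = t ++ (pvB_window s e (koff + PySem.Str.len t) ts).2 := by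
        simp [pvB_window, hk]
      rw [heq,
        show pvSpansOf koff (t :: ts)
            = (koff, koff + PySem.Str.len t, t) :: pvSpansOf (koff + PySem.Str.len t) ts from rfl,
        List.filter_cons, if_pos hh,
        show pvCat ((koff, koff + PySem.Str.len t, t)
              :: List.filter (pvOv s e) (pvSpansOf (koff + PySem.Str.len t) ts))
            = t ++ pvCat (List.filter (pvOv s e) (pvSpansOf (koff + PySem.Str.len t) ts)) from rfl,
        ih _ hrest]
    · have heq : (pvB_window s e koff (t :: ts)).2 = "" := by simp [pvB_window, hk]
      have hfilter : (pvSpansOf koff (t :: ts)).filter (pvOv s e) = [] := by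
        apply List.filter_eq_nil_iff.mpr
        intro b hb
        have hb1 : koff ≤ b.1 := (pvSpansOf_bounds (t :: ts) koff b hb).1
        simp only [pvOv, Bool.and_eq_true, decide_eq_true_eq, not_and]
        intro hlt _
        omega
      rw [heq, hfilter]
      rfl

lemma pvB_window_fst (s e : Int) (ts : List String) : ∀ koff : Int,
    (∀ x ∈ pvSpansOf koff ts, s < x.2.1) →
    ((pvB_window s e koff ts).1 = true ↔ ∃ t, (s, e, t) ∈ pvSpansOf koff ts) := by
  induction ts with
  | nil => intro koff _; simp [pvB_window, pvSpansOf]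
  | cons t ts ih =>
    intro koff h
    by_cases hk : koff < e
    · have hrest : ∀ x ∈ pvSpansOf (koff + PySem.Str.len t) ts, s < x.2.1 :=
        fun x hx => h x (List.mem_cons_of_mem _ hx)
      have heq : (pvB_window s e koff (t :: ts)).1
          = (((koff == s) && (koff + PySem.Str.len t == e)) || (pvB_window s e (koff + PySem.Str.len t) ts).1) := by
        simp [pvB_window, hk]
      rw [heq,
        show pvSpansOf koff (t :: ts)
            = (koff, koff + PySem.Str.len t, t) :: pvSpansOf (koff + PySem.Str.len t) ts from rfl]
      simp only [Bool.or_eq_true, Bool.and_eq_true, beq_iff_eq, ih _ hrest, List.mem_cons,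
        Prod.mk.injEq]
      constructor
      · rintro (⟨h1, h2⟩ | ⟨t', ht'⟩)
        · exact ⟨t, Or.inl ⟨h1.symm, h2.symm, rfl⟩⟩
        · exact ⟨t', Or.inr ht'⟩
      · rintro ⟨t', (⟨h1, h2, h3⟩ | ht')⟩
        · exact Or.inl ⟨h1.symm, h2.symm⟩
        · exact Or.inr ⟨t', ht'⟩
    · have heq : (pvB_window s e koff (t :: ts)).1 = false := by simp [pvB_window, hk]
      rw [heq]
      simp only [Bool.false_eq_true, false_iff, not_exists]
      intro t' ht'
      have hb1 : koff ≤ s := (pvSpansOf_bounds (t :: ts) koff (s, e, t') ht').1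
      have hst : s < e := h (s, e, t') ht'
      omega

-- emptyOffs membership
lemma pvB_emptyOffs_aux (ts : List String) : ∀ (acc : PySem.Set Int) (off v : Int),
    (v ∈ (ts.foldl
      (fun (acc : PySem.Set Int × Int) t =>
        ((if PySem.Str.len t == 0 then PySem.Set.add acc.1 acc.2 else acc.1), acc.2 + PySem.Str.len t))
      (acc, off)).1
      ↔ v ∈ acc ∨ ∃ t, (v, v, t) ∈ pvSpansOf off ts) := by
  induction ts with
  | nil => intro acc off v; simp [pvSpansOf]
  | cons t ts ih =>
    intro acc off v
    rw [List.foldl_cons, ih]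
    rw [show pvSpansOf off (t :: ts)
        = (off, off + PySem.Str.len t, t) :: pvSpansOf (off + PySem.Str.len t) ts from rfl]
    by_cases h : PySem.Str.len t = 0
    · have hc : (PySem.Str.len t == 0) = true := by simp only [beq_iff_eq]; exact h
      rw [hc]
      simp only [if_true, PySem.Set.mem_add, List.mem_cons, Prod.mk.injEq]
      constructor
      · rintro ((ha | rfl) | ⟨t', ht'⟩)
        · exact Or.inl ha
        · exact Or.inr ⟨t, Or.inl ⟨rfl, by omega, rfl⟩⟩
        · exact Or.inr ⟨t', Or.inr ht'⟩
      · rintro (ha | ⟨t', (⟨h1, h2, h3⟩ | ht')⟩)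
        · exact Or.inl (Or.inl ha)
        · exact Or.inl (Or.inr h1)
        · exact Or.inr ⟨t', ht'⟩
    · have hc : (PySem.Str.len t == 0) = false := by
        simp only [beq_eq_false_iff_ne, ne_eq]; exact h
      rw [hc]
      simp only [List.mem_cons, Prod.mk.injEq]
      have hpos : 0 ≤ PySem.Str.len t := pvLen_nonneg t
      constructor
      · rintro (ha | ⟨t', ht'⟩)
        · exact Or.inl ha
        · exact Or.inr ⟨t', Or.inr ht'⟩
      · rintro (ha | ⟨t', (⟨h1, h2, h3⟩ | ht')⟩)
        · exact Or.inl ha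
        · exfalso; omega
        · exact Or.inr ⟨t', ht'⟩

lemma pvB_emptyOffs_mem (hyp : List String) (v : Int) :
    (v ∈ pvB_emptyOffs hyp ↔ ∃ t, (v, v, t) ∈ pvSpansOf 0 hyp) := by
  rw [pvB_emptyOffs, pvB_emptyOffs_aux]
  simp [PySem.Set.empty]

-- main outer induction: A's fold over the reference spans against B's sweep
lemma pv_outer (hypAll : List String) (refs : List String) :
    ∀ (s joff : Int) (ts : List String) (errors : List (String × String))
      (P : List (Int × Int × String)),
      pvSpansOf 0 hypAll = P ++ pvSpansOf joff ts →
      (∀ x ∈ P, x.2.1 ≤ s) →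
      (pvSpansOf s refs).foldl
          (pvA_step (pvSpansOf 0 hypAll)
            (PySem.Set.ofList ((pvSpansOf 0 hypAll).map (fun x => (x.1, x.2.1))))) errors
        = pvB_loop (pvB_emptyOffs hypAll) errors joff ts s refs := by
  induction refs with
  | nil =>
    intro s joff ts errors P _ _
    simp [pvSpansOf, pvB_loop]
  | cons g gs ih =>
    intro s joff ts errors P h1 h2
    obtain ⟨P1, hQ1, hQ2, hQ3⟩ := pvB_skip_split ts joff s
    have hlen : 0 ≤ PySem.Str.len g := pvLen_nonneg g
    have hfull : pvSpansOf 0 hypAll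
        = (P ++ P1) ++ pvSpansOf (pvB_skip s joff ts).1 (pvB_skip s joff ts).2 := by
      rw [h1, hQ1, List.append_assoc]
    have hQle : ∀ x ∈ P ++ P1, x.2.1 ≤ s := by
      intro x hx
      rcases List.mem_append.mp hx with hx | hx
      · exact h2 x hx
      · exact hQ2 x hx
    -- the merged prediction strings agree
    have hmerge : pvA_merged s (s + PySem.Str.len g) (pvSpansOf 0 hypAll)
        = (pvB_window s (s + PySem.Str.len g) (pvB_skip s joff ts).1 (pvB_skip s joff ts).2).2 := by
      rw [pvA_merged_eq_filter s (s + PySem.Str.len g) _ (pvSpansOf_pairwise hypAll 0)]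
      rw [hfull, List.filter_append]
      have hnil : (P ++ P1).filter (pvOv s (s + PySem.Str.len g)) = [] := by
        apply List.filter_eq_nil_iff.mpr
        intro b hb
        have := hQle b hb
        simp only [pvOv, Bool.and_eq_true, decide_eq_true_eq, not_and]
        intro _
        omega
      rw [hnil, List.nil_append, ← pvB_window_snd s (s + PySem.Str.len g) _ _ hQ3]
    -- the matched flags agree
    have hcontains :
        PySem.Set.contains
            (PySem.Set.ofList ((pvSpansOf 0 hypAll).map (fun x => (x.1, x.2.1))))
            (s, s + PySem.Str.len g)
        = (((PySem.Str.len g == 0) && PySem.Set.contains (pvB_emptyOffs hypAll) s)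
            || (pvB_window s (s + PySem.Str.len g) (pvB_skip s joff ts).1 (pvB_skip s joff ts).2).1) := by
      rw [Bool.eq_iff_iff]
      constructor
      · intro hc
        have hmem : (s, s + PySem.Str.len g) ∈ (pvSpansOf 0 hypAll).map (fun x => (x.1, x.2.1)) := by
          rw [← PySem.Set.mem_ofList]
          simpa [PySem.Set.contains] using hc
        obtain ⟨x, hx, hxe⟩ := List.mem_map.mp hmem
        obtain ⟨x1, x2, xt⟩ := x
        simp only [Prod.mk.injEq] at hxe
        obtain ⟨he1, he2⟩ := hxe
        rw [he1, he2] at hx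
        simp only [Bool.or_eq_true, Bool.and_eq_true, beq_iff_eq]
        rw [hfull] at hx
        rcases List.mem_append.mp hx with hx' | hx'
        · have hle : s + PySem.Str.len g ≤ s := hQle _ hx'
          have hg0 : PySem.Str.len g = 0 := by omega
          left
          refine ⟨hg0, ?_⟩
          have hx'' := hx'
          rw [hg0, add_zero] at hx''
          have hmem0 : (s, s, xt) ∈ pvSpansOf 0 hypAll := by
            rw [hfull]
            exact List.mem_append_left _ hx''
          have : s ∈ pvB_emptyOffs hypAll := (pvB_emptyOffs_mem hypAll s).mpr ⟨xt, hmem0⟩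
          simpa [PySem.Set.contains] using this
        · right
          exact (pvB_window_fst s (s + PySem.Str.len g) _ _ hQ3).mpr ⟨xt, hx'⟩
      · intro hm
        simp only [Bool.or_eq_true, Bool.and_eq_true, beq_iff_eq] at hm
        have hmem : ∃ t', (s, s + PySem.Str.len g, t') ∈ pvSpansOf 0 hypAll := by
          rcases hm with ⟨hg0, hs⟩ | hw
          · have : s ∈ pvB_emptyOffs hypAll := by
              simpa [PySem.Set.contains] using hs
            obtain ⟨t', ht'⟩ := (pvB_emptyOffs_mem hypAll s).mp this
            exact ⟨t', by rw [hg0, add_zero]; exact ht'⟩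
          · obtain ⟨t', ht'⟩ := (pvB_window_fst s (s + PySem.Str.len g) _ _ hQ3).mp hw
            exact ⟨t', by rw [hfull]; exact List.mem_append_right _ ht'⟩
        obtain ⟨t', ht'⟩ := hmem
        have : (s, s + PySem.Str.len g) ∈ (pvSpansOf 0 hypAll).map (fun x => (x.1, x.2.1)) :=
          List.mem_map.mpr ⟨(s, s + PySem.Str.len g, t'), ht', rfl⟩
        rw [← PySem.Set.mem_ofList] at this
        simpa [PySem.Set.contains] using this
    -- one step of A equals one step of B
    have hstep : pvA_step (pvSpansOf 0 hypAll)
          (PySem.Set.ofList ((pvSpansOf 0 hypAll).map (fun x => (x.1, x.2.1)))) errors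
          (s, s + PySem.Str.len g, g)
        = (if (((PySem.Str.len g == 0) && PySem.Set.contains (pvB_emptyOffs hypAll) s)
              || (pvB_window s (s + PySem.Str.len g) (pvB_skip s joff ts).1 (pvB_skip s joff ts).2).1)
           then errors
           else errors ++ [(g, (pvB_window s (s + PySem.Str.len g) (pvB_skip s joff ts).1 (pvB_skip s joff ts).2).2)]) := by
      simp only [pvA_step]
      rw [hcontains, hmerge]
      cases (((PySem.Str.len g == 0) && PySem.Set.contains (pvB_emptyOffs hypAll) s)
          || (pvB_window s (s + PySem.Str.len g) (pvB_skip s joff ts).1 (pvB_skip s joff ts).2).1) <;> simp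
    rw [show pvSpansOf s (g :: gs)
        = (s, s + PySem.Str.len g, g) :: pvSpansOf (s + PySem.Str.len g) gs from rfl,
      List.foldl_cons, hstep]
    rw [show pvB_loop (pvB_emptyOffs hypAll) errors joff ts s (g :: gs)
        = pvB_loop (pvB_emptyOffs hypAll)
            (if (((PySem.Str.len g == 0) && PySem.Set.contains (pvB_emptyOffs hypAll) s)
                || (pvB_window s (s + PySem.Str.len g) (pvB_skip s joff ts).1 (pvB_skip s joff ts).2).1)
             then errors
             else errors ++ [(g, (pvB_window s (s + PySem.Str.len g) (pvB_skip s joff ts).1 (pvB_skip s joff ts).2).2)])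
            (pvB_skip s joff ts).1 (pvB_skip s joff ts).2 (s + PySem.Str.len g) gs from rfl]
    exact ih (s + PySem.Str.len g) (pvB_skip s joff ts).1 (pvB_skip s joff ts).2 _ (P ++ P1)
      hfull (fun x hx => by have := hQle x hx; omega)

-- ===== VERDICT (by name: the statement is the Claim_ definition above) =====
theorem extract_token_level_errors_by_spans_spec : Claim_equal_extract_token_level_errors_by_spans := by
  intro ref_tokens hyp_tokens _
  unfold Spec_extract_token_level_errors_by_spans
  unfold extract_token_level_errors_by_spans extract_token_level_errors_by_spans_alt
  by_cases hg : PySem.Str.join "" ref_tokens = PySem.Str.join "" hyp_tokens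
  · simp only [hg, ne_eq, not_true_eq_false, if_false]
    rw [pvA_getSpans_eq, pvA_getSpans_eq]
    exact pv_outer hyp_tokens ref_tokens 0 0 hyp_tokens [] [] (by simp) (by simp)
  · simp [hg]
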